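-- pv_equiv track=rewrite | github.com/radio-astro/casa | casa-3.2.0-1/code/xmlcasa/scripts/update_spw.py | update_spw
-- ===== SOURCE A (Python) =====
-- def update_spw(spw, spwmap=None):
--     """Given an spw:chan selection string, return what it should be after
--        the spws have been remapped (i.e. by split).  It does not change spw.
--
--        If given, spwmap will be used as a dictionary from (string) input spw to
--        (string) output spws.  Otherwise it will be freshly calculated.
--        Supplying spwmap doesn't just save work: it is also necessary for
--        chaining update_spw() calls when the first selection includes more spws
--        than the subsequent one(s).
--        Example:
--        myfitspw, spws = update_spw('0~3,5;6:1~7;11~13', None)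
--        # myfitspw == '0~3,4,5:1~7;11~1'
--        myspw = update_spw('1,5;6:8~10', spws)[0]
--        # myspw == '1,4,5:8~10', not '0,1,2:8~10'
--        """
--
--     # teststr = '0~3,5;6:1~7;11~13,7~9:0~3,11,7~8:6~8'
--     # should -> '0~3,4,5:1~7;11~13,6~8:0~3,9,6~7:6~8'
--
--     # Blank is valid.  Blank is good.
--     if not spw:
--         return '', {}
--
--     # A list of [spw, chan] pairs.  The chan parts will not be changed.
--     spwchans = []
--
--     make_spwmap = False
--     if not spwmap:
--         spwmap = {}
--         make_spwmap = True
--         spws = set([])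
--
--     # Because ; means different things when it separates spws and channel
--     # ranges, I can't think of a better way to construct spwchans than an
--     # explicit state machine.  (But $spws_alone =~ s/:[^,]+//g;)
--     inspw = True    # Must start with an spw.
--     spwgrp = ''
--     chagrp = ''
--
--     for c in spw:
--         if c == ',' or (inspw and c == ';'):  # Start new [spw, chan] pair.
--             # Store old one.
--             spwchans.append([spwgrp, chagrp])
--             if make_spwmap:
--                 if spwgrp.find('~') > -1:
--                     start, end = map(int, spwgrp.split('~'))
--                     spws.update(range(start, end + 1))
--                 else:
--                     spws.add(int(spwgrp))
--
--             # Initialize new one.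
--             spwgrp = ''
--             chagrp = ''
--             inspw = True
--         elif c == ':':
--             inspw = False
--         elif inspw:
--             spwgrp += c
--         else:
--             chagrp += c
--     # Store final [spw, chan] pair.
--     spwchans.append([spwgrp, chagrp])
--     if make_spwmap:
--         if spwgrp.find('~') > -1:
--             start, end = map(int, spwgrp.split('~'))
--             spws.update(range(start, end + 1))
--         else:
--             spws.add(int(spwgrp))
--
--     # print "spwchans =", spwchans
--     # print "spws =", spws
--
--     # Update spw (+ fitspw)
--     if make_spwmap:
--         i = 0
--         for s in sorted(spws):
--             spwmap[str(s)] = str(i)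
--             i += 1
--     outstr = ''
--     for sc in spwchans:
--         if sc[0].find('~') > -1:
--             start, end = sc[0].split('~')
--             outstr += spwmap[start] + '~' + spwmap[end]
--         else:
--             outstr += spwmap[sc[0]]
--         if sc[1]:
--             outstr += ':' + sc[1]
--         outstr += ','
--
--     return outstr.rstrip(','), spwmap # discard final comma.
-- ===== SOURCE B (Python) =====
-- def _seg_pairs(seg):
--     """Pairs contributed by one comma-separated segment: every ';'-separated
--     spw before the last gets an empty channel, the last gets the channel text
--     (everything after the first ':', with any further ':' dropped)."""
--     parts = seg.split(':')
--     chan = ''.join(parts[1:])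
--     sp = parts[0].split(';')
--     return [(s, '') for s in sp[:-1]] + [(sp[-1], chan)]
--
--
-- def _ids(s):
--     """The spw numbers named by one spw token ('a~b' range or a single int)."""
--     if '~' in s:
--         a, b = s.split('~')
--         return list(range(int(a), int(b) + 1))
--     return [int(s)]
--
--
-- def _map_tok(s, spwmap):
--     """Remap one spw token through spwmap, keeping an 'a~b' shape."""
--     if '~' in s:
--         a, b = s.split('~')
--         return spwmap[a] + '~' + spwmap[b]
--     return spwmap[s]
--
--
-- def update_spw(spw, spwmap=None):
--     if not spw:
--         return '', {}
--     pairs = [p for seg in spw.split(',') for p in _seg_pairs(seg)]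
--     if not spwmap:
--         spws = set()
--         for s, _ in pairs:
--             spws.update(_ids(s))
--         spwmap = {str(v): str(i) for i, v in enumerate(sorted(spws))}
--     out = [_map_tok(s, spwmap) + ((':' + c) if c else '') for s, c in pairs]
--     return ','.join(out).rstrip(','), spwmap
-- ===== Notes on version B (the rewrite author's own statement) =====
-- stated objective: simpler
-- what changed: Replaces the per-character inspw state machine (with set-building interleaved into the scan) by structured splitting: split on commas into segments, split each segment once on the first colon (joining any later colon parts, as the original discards that character), split the spw portion on semicolons, then build the map with a dict comprehension over enumerate(sorted(spws)) and assemble the output with a join over a list comprehension.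
import Mathlib
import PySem

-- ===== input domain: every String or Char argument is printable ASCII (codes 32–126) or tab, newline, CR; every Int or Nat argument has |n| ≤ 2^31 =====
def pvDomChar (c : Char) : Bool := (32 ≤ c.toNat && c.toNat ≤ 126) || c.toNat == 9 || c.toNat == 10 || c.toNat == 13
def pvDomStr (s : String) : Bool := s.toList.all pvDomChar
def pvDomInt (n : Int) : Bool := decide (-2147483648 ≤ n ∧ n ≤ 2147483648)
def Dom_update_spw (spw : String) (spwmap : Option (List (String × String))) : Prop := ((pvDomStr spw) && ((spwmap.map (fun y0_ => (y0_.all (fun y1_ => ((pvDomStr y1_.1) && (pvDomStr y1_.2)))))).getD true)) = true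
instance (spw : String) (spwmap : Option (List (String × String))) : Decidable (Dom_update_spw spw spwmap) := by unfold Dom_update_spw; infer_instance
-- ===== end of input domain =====

-- B re-parses the selection with structured splits (split on ',', ':', ';') instead of A's
-- per-character state machine; same return value (objective: simpler decomposition, not faster).

-- hand port of str.rstrip(',') — exact: drops every trailing ',' (used by both Pythons' final rstrip)
def pyRstripComma (cs : List Char) : List Char := (cs.reverse.dropWhile (· == ',')).reverse

-- ===== PORT A =====
-- the state machine's state: completed [spw, chan] pairs, the pending groups, the inspw flag,
-- and the incrementally built spws set (none = a ValueError already occurred)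
structure UpdAState where
  chans : List (List Char × List Char)
  sg : List Char
  cg : List Char
  insp : Bool
  spws : Option (PySem.Set Int)
deriving Repr, DecidableEq

-- the 'if make_spwmap:' block run at each store point (none = int() raised / bad '~' split)
def updA_addTok (spws? : Option (PySem.Set Int)) (sg : List Char) : Option (PySem.Set Int) :=
  match spws? with
  | none => none
  | some s =>
    if PySem.Chars.find sg ['~'] > -1 then
      match PySem.Chars.splitOn sg ['~'] with
      | [a, b] =>
        match PySem.Int.ofChars? a, PySem.Int.ofChars? b with
        | some x, some y => some (PySem.Set.update s (PySem.List.pyRange x (y + 1) 1))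
        | _, _ => none
      | _ => none
    else
      match PySem.Int.ofChars? sg with
      | some v => some (PySem.Set.add s v)
      | none => none

-- "Store old one. … Initialize new one."
def updA_store (make : Bool) (s : UpdAState) : UpdAState :=
  { chans := s.chans ++ [(s.sg, s.cg)]
    sg := []
    cg := []
    insp := true
    spws := if make then updA_addTok s.spws s.sg else s.spws }

-- the loop body 'for c in spw:'
def updA_step (make : Bool) (s : UpdAState) (c : Char) : UpdAState :=
  if c = ',' ∨ (s.insp ∧ c = ';') then updA_store make s
  else if c = ':' then { s with insp := false }
  else if s.insp then { s with sg := s.sg ++ [c] }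
  else { s with cg := s.cg ++ [c] }

-- 'i = 0; for s in sorted(spws): spwmap[str(s)] = str(i); i += 1'
def updA_buildMap (spws : PySem.Set Int) : List (String × String) :=
  ((PySem.List.sorted spws (fun x => x) false).foldl
    (fun (p : List (String × String) × Int) v =>
      (p.1 ++ [(String.ofList (PySem.Int.toChars v), String.ofList (PySem.Int.toChars p.2))], p.2 + 1))
    ([], 0)).1

-- the '~'-aware lookup of one stored pair's spw part (none = KeyError / ValueError)
def updA_out1 (m : List (String × String)) (sc : List Char × List Char) (out : List Char) :
    Option (List Char) :=
  if PySem.Chars.find sc.1 ['~'] > -1 then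
    match PySem.Chars.splitOn sc.1 ['~'] with
    | [a, b] =>
      match List.lookup (String.ofList a) m, List.lookup (String.ofList b) m with
      | some x, some y => some (out ++ x.toList ++ ['~'] ++ y.toList)
      | _, _ => none
    | _ => none
  else
    match List.lookup (String.ofList sc.1) m with
    | some x => some (out ++ x.toList)
    | none => none

def update_spw (spw : String) (spwmap : Option (List (String × String))) :
    String × (List (String × String)) :=
  if spw.toList = [] then ("", [])
  else
    let given := spwmap.getD []
    let make := given.isEmpty
    let fin := updA_store make (spw.toList.foldl (updA_step make) ⟨[], [], [], true, some []⟩)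
    let m? : Option (List (String × String)) :=
      if make then fin.spws.map updA_buildMap else some given
    match m? with
    | none => ("", [])
    | some m =>
      let out? := fin.chans.foldl
        (fun (acc : Option (List Char)) sc => acc.bind (fun out =>
          (updA_out1 m sc out).map (fun o =>
            (if sc.2 ≠ [] then o ++ [':'] ++ sc.2 else o) ++ [','])))
        (some [])
      match out? with
      | none => ("", [])
      | some o => (String.ofList (pyRstripComma o), m)

-- ===== PORT B =====
-- _seg_pairs: pairs contributed by one comma-separated segment
def updB_segPairs (seg : List Char) : List (List Char × List Char) :=
  let parts := PySem.Chars.splitOn seg [':']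
  let chan := PySem.Chars.join [] (parts.drop 1)
  let sp := PySem.Chars.splitOn (parts.headD []) [';']
  sp.dropLast.map (fun s => (s, ([] : List Char))) ++ [(sp.getLastD [], chan)]

-- _ids: the spw numbers named by one spw token (none = ValueError)
def updB_ids? (s : List Char) : Option (List Int) :=
  if PySem.Chars.isIn ['~'] s then
    match PySem.Chars.splitOn s ['~'] with
    | [a, b] =>
      match PySem.Int.ofChars? a, PySem.Int.ofChars? b with
      | some x, some y => some (PySem.List.pyRange x (y + 1) 1)
      | _, _ => none
    | _ => none
  else (PySem.Int.ofChars? s).map (fun v => [v])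

-- _map_tok: remap one spw token through spwmap (none = KeyError / ValueError)
def updB_tok? (m : List (String × String)) (s : List Char) : Option (List Char) :=
  if PySem.Chars.isIn ['~'] s then
    match PySem.Chars.splitOn s ['~'] with
    | [a, b] =>
      match List.lookup (String.ofList a) m, List.lookup (String.ofList b) m with
      | some x, some y => some (x.toList ++ ['~'] ++ y.toList)
      | _, _ => none
    | _ => none
  else (List.lookup (String.ofList s) m).map String.toList

def update_spw_alt (spw : String) (spwmap : Option (List (String × String))) :
    String × (List (String × String)) :=
  if spw.toList = [] then ("", [])
  else
    let pairs := (PySem.Chars.splitOn spw.toList [',']).flatMap updB_segPairs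
    let m? : Option (List (String × String)) :=
      if (spwmap.getD []).isEmpty then
        (pairs.foldl
          (fun (acc : Option (PySem.Set Int)) p =>
            acc.bind (fun s => (updB_ids? p.1).map (fun ids => PySem.Set.update s ids)))
          (some [])).map
          (fun spws =>
            (PySem.List.enumerate (PySem.List.sorted spws (fun x => x) false) 0).map
              (fun q => (String.ofList (PySem.Int.toChars q.2), String.ofList (PySem.Int.toChars q.1))))
      else some (spwmap.getD [])
    match m? with
    | none => ("", [])
    | some m =>
      match pairs.mapM (fun p =>
          (updB_tok? m p.1).map (fun t => if p.2 ≠ [] then t ++ [':'] ++ p.2 else t)) with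
      | none => ("", [])
      | some toks => (String.ofList (pyRstripComma (PySem.Chars.join [','] toks)), m)

-- ===== PRECONDITION & SPEC =====
-- the spw tokens of the selection string (each ';'-separated piece before the first ':')
def preToks (spw : String) : List (List Char) :=
  (PySem.Chars.splitOn spw.toList [',']).flatMap
    (fun seg => PySem.Chars.splitOn ((PySem.Chars.splitOn seg [':']).headD []) [';'])

-- token part written exactly as str(int(p)) — the only form whose key can exist in the built map
def preCanonB (p : List Char) : Bool :=
  (PySem.Int.ofChars? p).map PySem.Int.toChars == some p

-- the spw numbers a token contributes to the freshly built set
def preIdsOf (t : List Char) : List Int :=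
  match PySem.Chars.splitOn t ['~'] with
  | [a, b] =>
    match PySem.Int.ofChars? a, PySem.Int.ofChars? b with
    | some x, some y => PySem.List.pyRange x (y + 1) 1
    | _, _ => []
  | [a] => ((PySem.Int.ofChars? a).map (fun v => [v])).getD []
  | _ => []

def preOk (spw : String) (spwmap : Option (List (String × String))) : Bool :=
  let toks := preToks spw
  match spwmap.getD [] with
  | [] =>
    toks.all (fun t =>
      (PySem.Chars.splitOn t ['~']).length ≤ 2 &&
      (PySem.Chars.splitOn t ['~']).all preCanonB) &&
    (let S := toks.flatMap preIdsOf
     toks.all (fun t => (PySem.Chars.splitOn t ['~']).all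
       (fun p => ((PySem.Int.ofChars? p).map (S.contains ·)).getD false)))
  | m =>
    toks.all (fun t =>
      (PySem.Chars.splitOn t ['~']).length ≤ 2 &&
      (PySem.Chars.splitOn t ['~']).all (fun p => (List.lookup (String.ofList p) m).isSome))

-- Pre_ excludes exactly the inputs on which the Python raises: a spw token (or range endpoint)
-- that int() rejects or that has no key in the map used (ValueError / KeyError), or a token with
-- more than one range separator (unpack ValueError).
def Pre_update_spw (spw : String) (spwmap : Option (List (String × String))) : Prop :=
  spw.toList = [] ∨ preOk spw spwmap = true
instance (spw : String) (spwmap : Option (List (String × String))) :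
    Decidable (Pre_update_spw spw spwmap) := by unfold Pre_update_spw; infer_instance

def pvWitness_update_spw : String × (Option (List (String × String))) :=
  ("0~3,5;6:1~7;11~13", none)

def Spec_update_spw (spw : String) (spwmap : Option (List (String × String))) (out : String × (List (String × String))) : Prop := out = update_spw_alt spw spwmap
instance (spw : String) (spwmap : Option (List (String × String))) (out : String × (List (String × String))) : Decidable (Spec_update_spw spw spwmap out) := by unfold Spec_update_spw; infer_instance

-- ===== CLAIM (what is proved, stated in full; the proofs are below) =====
def Claim_equal_update_spw : Prop := ∀ (spw : String) (spwmap : Option (List (String × String))), Dom_update_spw spw spwmap → Pre_update_spw spw spwmap → Spec_update_spw spw spwmap (update_spw spw spwmap)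

-- ===== LEMMAS AND PROOFS =====

theorem join_nil_flatten (l : List (List Char)) : PySem.Chars.join [] l = l.flatten := by
  induction l with
  | nil => simp [PySem.Chars.join_nil]
  | cons p rest ih =>
    cases rest with
    | nil => simp [PySem.Chars.join, List.intercalate]
    | cons q r => rw [PySem.Chars.join_cons_cons]; simp_all

theorem splitOnP_ne_nil (p : Char → Bool) (l : List Char) : List.splitOnP p l ≠ [] := by
  induction l with
  | nil => simp [List.splitOnP_nil]
  | cons c rest ih =>
    rw [List.splitOnP_cons]
    split
    · simp
    · cases hs : List.splitOnP p rest with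
      | nil => exact absurd hs ih
      | cons x xs => simp

theorem modifyHead_fun_id {α : Type} (l : List α) : l.modifyHead (fun x => x) = l := by
  cases l <;> simp

theorem splitOn_go_single (d : Char) :
    ∀ (fuel : Nat) (l cur : List Char) (acc : List (List Char)), l.length < fuel →
      PySem.Chars.splitOn.go [d] fuel l cur acc =
        acc.reverse ++ (List.splitOnP (· == d) l).modifyHead (cur.reverse ++ ·) := by
  intro fuel
  induction fuel with
  | zero => intro l cur acc h; omega
  | succ n ih =>
    intro l cur acc h
    cases l with
    | nil => simp [PySem.Chars.splitOn.go, List.splitOnP_nil]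
    | cons c rest =>
      rw [PySem.Chars.splitOn.go]
      by_cases hc : d = c
      · subst hc
        simp only [List.isPrefixOf, BEq.rfl, Bool.true_and, if_pos]
        rw [ih _ _ _ (by simp at h ⊢; omega)]
        rw [List.splitOnP_cons]
        simp [modifyHead_fun_id]
      · have hpre : List.isPrefixOf [d] (c :: rest) = false := by
          simp [List.isPrefixOf, hc]
        rw [hpre]
        simp only [Bool.false_eq_true, if_false]
        rw [ih _ _ _ (by simp at h ⊢; omega)]
        rw [List.splitOnP_cons]
        have hcd : (c == d) = false := by simp [Ne.symm hc]
        rw [hcd]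
        simp only [Bool.false_eq_true, if_false]
        cases hs : List.splitOnP (· == d) rest with
        | nil => exact absurd hs (splitOnP_ne_nil _ _)
        | cons x xs => simp

theorem splitOn_single (d : Char) (cs : List Char) :
    PySem.Chars.splitOn cs [d] = List.splitOn d cs := by
  rw [PySem.Chars.splitOn, splitOn_go_single d _ _ _ _ (by omega)]
  simp [List.splitOn, modifyHead_fun_id]

def runToks : List Char → List Char → List Char → Bool → List (List Char × List Char)
  | [], sg, cg, _ => [(sg, cg)]
  | c :: cs, sg, cg, insp =>
    if c = ',' ∨ (insp ∧ c = ';') then (sg, cg) :: runToks cs [] [] true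
    else if c = ':' then runToks cs sg cg false
    else if insp then runToks cs (sg ++ [c]) cg insp
    else runToks cs sg (cg ++ [c]) insp

def segPairsL (seg : List Char) : List (List Char × List Char) :=
  let sp := List.splitOn ';' ((List.splitOn ':' seg).headD [])
  sp.dropLast.map (fun s => (s, ([] : List Char))) ++
    [(sp.getLastD [], ((List.splitOn ':' seg).drop 1).flatten)]

def segAll (cs : List Char) : List (List Char × List Char) :=
  (List.splitOn ',' cs).flatMap segPairsL

theorem splitOn_ne_nil' (d : Char) (l : List Char) : List.splitOn d l ≠ [] :=
  splitOnP_ne_nil _ l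

theorem splitOn_cons (d c : Char) (cs : List Char) :
    List.splitOn d (c :: cs) =
      if c = d then [] :: List.splitOn d cs
      else (List.splitOn d cs).modifyHead (c :: ·) := by
  rw [List.splitOn, List.splitOnP_cons]
  by_cases h : c = d <;> simp [h, List.splitOn]

theorem modifyHead_append_left {α : Type} (f : α → α) (l r : List α) (h : l ≠ []) :
    (l ++ r).modifyHead f = l.modifyHead f ++ r := by
  cases l with
  | nil => exact absurd rfl h
  | cons x xs => simp

theorem flatten_modifyHead_cons (c : Char) (l : List (List Char)) (h : l ≠ []) :
    (l.modifyHead (c :: ·)).flatten = c :: l.flatten := by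
  cases l with
  | nil => exact absurd rfl h
  | cons x xs => simp

theorem segPairsL_nil : segPairsL [] = [([], [])] := by decide

theorem segPairsL_ne_nil (seg : List Char) : segPairsL seg ≠ [] := by
  simp [segPairsL]

theorem segPairsL_semi (seg : List Char) :
    segPairsL (';' :: seg) = ([], []) :: segPairsL seg := by
  rw [segPairsL, segPairsL]
  rw [splitOn_cons]
  rw [if_neg (by decide)]
  obtain ⟨p0, ps, hp⟩ := List.exists_cons_of_ne_nil (splitOn_ne_nil' ':' seg)
  rw [hp]
  simp only [List.modifyHead, List.headD_cons, List.drop_succ_cons, List.drop_zero]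
  rw [splitOn_cons, if_pos rfl]
  obtain ⟨q, qs, hq⟩ := List.exists_cons_of_ne_nil (splitOn_ne_nil' ';' p0)
  rw [hq]
  cases qs <;> simp

theorem segPairsL_colon (seg : List Char) :
    segPairsL (':' :: seg) = [([], (List.splitOn ':' seg).flatten)] := by
  rw [segPairsL]
  rw [splitOn_cons, if_pos rfl]
  simp [List.splitOn, List.splitOnP_nil]

theorem segPairsL_char (c : Char) (seg : List Char) (h1 : c ≠ ':') (h2 : c ≠ ';') :
    segPairsL (c :: seg) = (segPairsL seg).modifyHead (fun p => (c :: p.1, p.2)) := by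
  rw [segPairsL, segPairsL]
  rw [splitOn_cons, if_neg h1]
  obtain ⟨p0, ps, hp⟩ := List.exists_cons_of_ne_nil (splitOn_ne_nil' ':' seg)
  rw [hp]
  simp only [List.modifyHead, List.headD_cons, List.drop_succ_cons, List.drop_zero]
  rw [splitOn_cons, if_neg h2]
  obtain ⟨q, qs, hq⟩ := List.exists_cons_of_ne_nil (splitOn_ne_nil' ';' p0)
  rw [hq]
  cases qs <;> simp

theorem segAll_ne_nil (cs : List Char) : segAll cs ≠ [] := by
  obtain ⟨s0, rest, hs⟩ := List.exists_cons_of_ne_nil (splitOn_ne_nil' ',' cs)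
  rw [segAll, hs, List.flatMap_cons]
  simp [segPairsL_ne_nil s0]

theorem modifyHead_nil_pair (l : List (List Char × List Char)) :
    l.modifyHead (fun p => ([] ++ p.1, [] ++ p.2)) = l := by
  cases l with
  | nil => rfl
  | cons x xs => simp

theorem updA_run (make : Bool) :
    ∀ (cs : List Char) (st : UpdAState),
      updA_store make (cs.foldl (updA_step make) st) =
        ⟨st.chans ++ runToks cs st.sg st.cg st.insp, [], [], true,
         if make then
           (runToks cs st.sg st.cg st.insp).foldl (fun a p => updA_addTok a p.1) st.spws
         else st.spws⟩ := by
  intro cs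
  induction cs with
  | nil =>
    intro st
    simp [runToks, updA_store]
  | cons c cs ih =>
    intro st
    rw [List.foldl_cons]
    rw [updA_step]
    by_cases h1 : c = ',' ∨ (st.insp ∧ c = ';')
    · rw [if_pos h1, ih]
      have hr : runToks (c :: cs) st.sg st.cg st.insp = (st.sg, st.cg) :: runToks cs [] [] true := by
        rw [runToks]
        rw [if_pos (by simpa using h1)]
      rw [hr]
      simp only [updA_store, List.foldl_cons, List.append_assoc, List.singleton_append]
      split <;> rfl
    · rw [if_neg h1]
      by_cases h2 : c = ':'
      · rw [if_pos h2, ih]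
        have hr : runToks (c :: cs) st.sg st.cg st.insp = runToks cs st.sg st.cg false := by
          rw [runToks, if_neg (by simpa using h1), if_pos h2]
        rw [hr]
      · rw [if_neg h2]
        by_cases h3 : st.insp
        · rw [if_pos h3, ih]
          have hr : runToks (c :: cs) st.sg st.cg st.insp =
              runToks cs (st.sg ++ [c]) st.cg st.insp := by
            rw [runToks, if_neg (by simpa using h1), if_neg h2, if_pos h3]
          rw [hr]
        · rw [if_neg h3, ih]
          have hr : runToks (c :: cs) st.sg st.cg st.insp =
              runToks cs st.sg (st.cg ++ [c]) st.insp := by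
            rw [runToks, if_neg (by simpa using h1), if_neg h2, if_neg h3]
          rw [hr]

theorem runToks_eq_segAll :
    ∀ (cs sg cg : List Char),
      (runToks cs sg cg true = (segAll cs).modifyHead (fun p => (sg ++ p.1, cg ++ p.2))) ∧
      (runToks cs sg cg false =
        (sg, cg ++ (List.splitOn ':' ((List.splitOn ',' cs).headD [])).flatten) ::
        ((List.splitOn ',' cs).tail).flatMap segPairsL) := by
  intro cs
  induction cs with
  | nil =>
    intro sg cg
    constructor
    · simp [runToks, segAll, List.splitOn, List.splitOnP_nil, segPairsL_nil]
    · simp [runToks, List.splitOn, List.splitOnP_nil]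
  | cons c cs ih =>
    intro sg cg
    obtain ⟨s0, rest, hs⟩ := List.exists_cons_of_ne_nil (splitOn_ne_nil' ',' cs)
    obtain ⟨x, xs, hsa⟩ := List.exists_cons_of_ne_nil (segAll_ne_nil cs)
    constructor
    · -- insp = true
      rw [runToks]
      by_cases hcom : c = ','
      · subst hcom
        rw [if_pos (Or.inl rfl)]
        rw [(ih [] []).1, modifyHead_nil_pair]
        have : segAll (',' :: cs) = ([], []) :: segAll cs := by
          rw [segAll, splitOn_cons, if_pos rfl, List.flatMap_cons, segPairsL_nil, segAll]
          rfl
        rw [this, hsa]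
        simp
      · by_cases hsemi : c = ';'
        · subst hsemi
          rw [if_pos (Or.inr ⟨rfl, rfl⟩)]
          rw [(ih [] []).1, modifyHead_nil_pair]
          have : segAll (';' :: cs) = ([], []) :: segAll cs := by
            rw [segAll, splitOn_cons, if_neg (by decide), hs, List.modifyHead_cons,
                List.flatMap_cons, segPairsL_semi, segAll, hs, List.flatMap_cons]
            rfl
          rw [this, hsa]
          simp
        · rw [if_neg (by simp [hcom, hsemi])]
          by_cases hcol : c = ':'
          · subst hcol
            rw [if_pos rfl]
            rw [(ih sg cg).2, hs]
            have : segAll (':' :: cs) =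
                ([], (List.splitOn ':' s0).flatten) :: rest.flatMap segPairsL := by
              rw [segAll, splitOn_cons, if_neg (by decide), hs, List.modifyHead_cons,
                  List.flatMap_cons, segPairsL_colon]
              rfl
            rw [this, List.modifyHead_cons]
            simp
          · rw [if_neg hcol, if_pos rfl]
            rw [(ih (sg ++ [c]) cg).1]
            have : segAll (c :: cs) = (segAll cs).modifyHead (fun p => (c :: p.1, p.2)) := by
              rw [segAll, splitOn_cons, if_neg hcom, hs, List.modifyHead_cons,
                  List.flatMap_cons, segPairsL_char c s0 hcol hsemi, segAll, hs,
                  List.flatMap_cons]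
              rw [modifyHead_append_left _ _ _ (segPairsL_ne_nil s0)]
            rw [this, hsa, List.modifyHead_cons, List.modifyHead_cons, List.modifyHead_cons]
            simp
    · -- insp = false
      rw [runToks]
      by_cases hcom : c = ','
      · subst hcom
        rw [if_pos (Or.inl rfl)]
        rw [(ih [] []).1, modifyHead_nil_pair]
        rw [splitOn_cons, if_pos rfl]
        simp [List.splitOn, List.splitOnP_nil, segAll]
      · rw [if_neg (by simp [hcom])]
        by_cases hcol : c = ':'
        · subst hcol
          rw [if_pos rfl]
          rw [(ih sg cg).2, hs]
          rw [splitOn_cons, if_neg (by decide), hs, List.modifyHead_cons]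
          simp only [List.headD_cons, List.tail_cons]
          rw [splitOn_cons, if_pos rfl]
          simp
        · rw [if_neg hcol]
          simp only [Bool.false_eq_true, if_false]
          rw [(ih sg (cg ++ [c])).2, hs]
          rw [splitOn_cons, if_neg hcom, hs, List.modifyHead_cons]
          simp only [List.headD_cons, List.tail_cons]
          rw [splitOn_cons, if_neg hcol]
          rw [flatten_modifyHead_cons _ _ (splitOn_ne_nil' ':' s0)]
          simp

-- B's segment pairs = the split-side pairs
theorem updB_segPairs_eq (seg : List Char) : updB_segPairs seg = segPairsL seg := by
  rw [updB_segPairs, segPairsL]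
  rw [splitOn_single, splitOn_single, join_nil_flatten]

-- L3: one token's set update agrees between the two ports
theorem addTok_eq (a : Option (PySem.Set Int)) (t : List Char) :
    updA_addTok a t = a.bind (fun s => (updB_ids? t).map (fun ids => PySem.Set.update s ids)) := by
  cases a with
  | none => rfl
  | some s =>
    rw [updA_addTok, updB_ids?]
    by_cases hin : ['~'] <:+: t
    · have h1 : PySem.Chars.find t ['~'] > -1 := by
        have := (PySem.Chars.find_nonneg_iff t ['~']).2 hin; omega
      have h2 : PySem.Chars.isIn ['~'] t = true := (PySem.Chars.isIn_iff_infix _ _).2 hin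
      rw [if_pos h1, h2, if_pos rfl]
      cases hsp : PySem.Chars.splitOn t ['~'] with
      | nil => simp
      | cons a l =>
        cases l with
        | nil => simp
        | cons b l2 =>
          cases l2 with
          | nil => cases ha : PySem.Int.ofChars? a <;> cases hb : PySem.Int.ofChars? b <;> simp [ha, hb]
          | cons x l3 => simp
    · have h1 : ¬ PySem.Chars.find t ['~'] > -1 := by
        have := (PySem.Chars.find_eq_neg_one_iff t ['~']).2 hin; omega
      have h2 : PySem.Chars.isIn ['~'] t = false := by
        cases hb : PySem.Chars.isIn ['~'] t
        · rfl
        · exact absurd ((PySem.Chars.isIn_iff_infix _ _).1 hb) hin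
      rw [if_neg h1, h2]
      simp only [Bool.false_eq_true, if_false]
      cases ho : PySem.Int.ofChars? t <;> simp [PySem.Set.update]

-- L4: A's counter loop building the map = B's enumerate comprehension
theorem buildMap_go (l : List Int) :
    ∀ (acc : List (String × String)) (i : Int),
      (l.foldl (fun (p : List (String × String) × Int) v =>
        (p.1 ++ [(String.ofList (PySem.Int.toChars v), String.ofList (PySem.Int.toChars p.2))],
         p.2 + 1)) (acc, i)).1 =
      acc ++ (PySem.List.enumerate l i).map
        (fun q => (String.ofList (PySem.Int.toChars q.2), String.ofList (PySem.Int.toChars q.1))) := by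
  induction l with
  | nil => intro acc i; simp [PySem.List.enumerate_nil]
  | cons v vs ih =>
    intro acc i
    rw [List.foldl_cons, PySem.List.enumerate_cons, List.map_cons, ih]
    simp

theorem buildMap_eq (spws : PySem.Set Int) :
    updA_buildMap spws =
      (PySem.List.enumerate (PySem.List.sorted spws (fun x => x) false) 0).map
        (fun q => (String.ofList (PySem.Int.toChars q.2), String.ofList (PySem.Int.toChars q.1))) := by
  rw [updA_buildMap, buildMap_go]
  simp

-- L5: one pair's output piece agrees between the two ports
theorem out1_eq (m : List (String × String)) (sc : List Char × List Char) (out : List Char) :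
    updA_out1 m sc out = (updB_tok? m sc.1).map (fun t => out ++ t) := by
  rw [updA_out1, updB_tok?]
  by_cases hin : ['~'] <:+: sc.1
  · have h1 : PySem.Chars.find sc.1 ['~'] > -1 := by
      have := (PySem.Chars.find_nonneg_iff sc.1 ['~']).2 hin; omega
    have h2 : PySem.Chars.isIn ['~'] sc.1 = true := (PySem.Chars.isIn_iff_infix _ _).2 hin
    rw [if_pos h1, h2, if_pos rfl]
    cases hsp : PySem.Chars.splitOn sc.1 ['~'] with
    | nil => simp
    | cons a l =>
      cases l with
      | nil => simp
      | cons b l2 =>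
        cases l2 with
        | nil =>
          cases ha : List.lookup (String.ofList a) m <;>
            cases hb : List.lookup (String.ofList b) m <;> simp [ha, hb]
        | cons x l3 => simp
  · have h1 : ¬ PySem.Chars.find sc.1 ['~'] > -1 := by
      have := (PySem.Chars.find_eq_neg_one_iff sc.1 ['~']).2 hin; omega
    have h2 : PySem.Chars.isIn ['~'] sc.1 = false := by
      cases hb : PySem.Chars.isIn ['~'] sc.1
      · rfl
      · exact absurd ((PySem.Chars.isIn_iff_infix _ _).1 hb) hin
    rw [if_neg h1, h2]
    simp only [Bool.false_eq_true, if_false]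
    cases hl : List.lookup (String.ofList sc.1) m <;> simp

-- A's output fold stays none once none
theorem outFold_none (m : List (String × String)) (pairs : List (List Char × List Char)) :
    pairs.foldl
      (fun (acc : Option (List Char)) sc => acc.bind (fun o =>
        (updA_out1 m sc o).map (fun o' =>
          (if sc.2 ≠ [] then o' ++ [':'] ++ sc.2 else o') ++ [','])))
      none = none := by
  induction pairs with
  | nil => rfl
  | cons p ps ih => simpa using ih

-- L5': A's output fold = B's mapM + flatten-with-commas
theorem outFold_eq (m : List (String × String)) :
    ∀ (pairs : List (List Char × List Char)) (out : List Char),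
      pairs.foldl
        (fun (acc : Option (List Char)) sc => acc.bind (fun o =>
          (updA_out1 m sc o).map (fun o' =>
            (if sc.2 ≠ [] then o' ++ [':'] ++ sc.2 else o') ++ [','])))
        (some out) =
      (pairs.mapM (fun p =>
        (updB_tok? m p.1).map (fun t => if p.2 ≠ [] then t ++ [':'] ++ p.2 else t))).map
        (fun ts => out ++ (ts.map (· ++ [','])).flatten) := by
  intro pairs
  induction pairs with
  | nil => intro out; simp
  | cons p ps ih =>
    intro out
    rw [List.foldl_cons, List.mapM_cons]
    simp only [Option.bind_some]
    rw [out1_eq]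
    cases htok : updB_tok? m p.1 with
    | none =>
      simp only [Option.map_none, outFold_none]
      simp
    | some t =>
      simp only [Option.map_some]
      rw [show ((if p.2 ≠ [] then (out ++ t) ++ [':'] ++ p.2 else out ++ t) ++ [',']) =
            out ++ ((if p.2 ≠ [] then t ++ [':'] ++ p.2 else t) ++ [',']) from by
        by_cases h : p.2 = [] <;> simp [h]]
      rw [ih]
      cases hm : ps.mapM (fun p =>
          (updB_tok? m p.1).map (fun t => if p.2 ≠ [] then t ++ [':'] ++ p.2 else t)) with
      | none => simp
      | some us => simp

-- comma-flatten vs comma-join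
theorem flatten_comma (ts : List (List Char)) :
    (ts.map (· ++ [','])).flatten =
      PySem.Chars.join [','] ts ++ if ts = [] then [] else [','] := by
  induction ts with
  | nil => simp [PySem.Chars.join_nil]
  | cons t rest ih =>
    cases rest with
    | nil => simp [PySem.Chars.join, List.intercalate]
    | cons q rs =>
      rw [List.map_cons, List.flatten_cons, ih, PySem.Chars.join_cons_cons]
      simp

theorem rstrip_append_comma (x : List Char) :
    pyRstripComma (x ++ [',']) = pyRstripComma x := by
  rw [pyRstripComma, pyRstripComma]
  simp

theorem rstrip_flatten_join (ts : List (List Char)) :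
    pyRstripComma ((ts.map (· ++ [','])).flatten) = pyRstripComma (PySem.Chars.join [','] ts) := by
  rw [flatten_comma]
  by_cases h : ts = []
  · simp [h]
  · rw [if_neg h, rstrip_append_comma]

-- the two ports agree on every input (the precondition is not even needed for the return values:
-- on excluded inputs both ports return the ("", []) default where the Pythons raise)
theorem main_eq (spw : String) (spwmap : Option (List (String × String))) :
    update_spw spw spwmap = update_spw_alt spw spwmap := by
  rw [update_spw, update_spw_alt]
  by_cases hnil : spw.toList = []
  · rw [if_pos hnil, if_pos hnil]
  · rw [if_neg hnil, if_neg hnil]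
    simp only []
    rw [updA_run]
    simp only []
    rw [(runToks_eq_segAll spw.toList [] []).1, modifyHead_nil_pair]
    rw [splitOn_single]
    rw [show updB_segPairs = segPairsL from funext updB_segPairs_eq]
    rw [show ((List.splitOn ',' spw.toList).flatMap segPairsL) = segAll spw.toList from rfl]
    rw [show (fun (a : Option (PySem.Set Int)) (p : List Char × List Char) =>
          updA_addTok a p.1) =
        (fun (acc : Option (PySem.Set Int)) p =>
          acc.bind (fun s => (updB_ids? p.1).map (fun ids => PySem.Set.update s ids))) from
      funext fun a => funext fun p => addTok_eq a p.1]
    rw [show updA_buildMap =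
        (fun spws => (PySem.List.enumerate (PySem.List.sorted spws (fun x => x) false) 0).map
          (fun q => (String.ofList (PySem.Int.toChars q.2), String.ofList (PySem.Int.toChars q.1))))
      from funext buildMap_eq]
    by_cases hmake : (spwmap.getD []).isEmpty
    · rw [if_pos hmake, if_pos hmake, if_pos hmake]
      cases hx : (segAll spw.toList).foldl
          (fun (acc : Option (PySem.Set Int)) p =>
            acc.bind (fun s => (updB_ids? p.1).map (fun ids => PySem.Set.update s ids)))
          (some []) with
      | none => simp
      | some spws =>
        simp only [Option.map_some]
        rw [outFold_eq]
        cases hm : (segAll spw.toList).mapM (fun p =>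
            (updB_tok?
              ((PySem.List.enumerate (PySem.List.sorted spws (fun x => x) false) 0).map
                (fun q => (String.ofList (PySem.Int.toChars q.2),
                           String.ofList (PySem.Int.toChars q.1)))) p.1).map
              (fun t => if p.2 ≠ [] then t ++ [':'] ++ p.2 else t)) with
        | none => simp at hm; simp [hm]
        | some ts => simp at hm; simp [hm, rstrip_flatten_join]
    · rw [if_neg hmake, if_neg hmake]
      simp only [List.nil_append]
      rw [outFold_eq]
      cases hm : (segAll spw.toList).mapM (fun p =>
          (updB_tok? (spwmap.getD []) p.1).map
            (fun t => if p.2 ≠ [] then t ++ [':'] ++ p.2 else t)) with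
      | none => simp at hm; simp
      | some ts => simp at hm; simp [rstrip_flatten_join]

-- ===== VERDICT (by name: the statement is the Claim_ definition above) =====
theorem update_spw_spec : Claim_equal_update_spw := by
  intro spw spwmap _ _
  exact main_eq spw spwmap
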